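-- pv_equiv track=rewrite | github.com/Msundara19/Home_appliance_control | benchmark.py | generate_synthetic_landmarks
-- ===== SOURCE A (Python) =====
-- from typing import List, Dict, Optional
--
-- def generate_synthetic_landmarks(num_fingers: int) -> List[List[int]]:
--     """Generate synthetic hand landmarks for testing."""
--     # Base hand shape (21 landmarks: [id, x, y])
--     landmarks = [[i, 300 + (i % 5) * 20, 400] for i in range(21)]
--
--     # Finger tip and pip indices
--     finger_tips = [8, 12, 16, 20]  # Index, Middle, Ring, Pinky tips
--     finger_pips = [6, 10, 14, 18]  # Corresponding PIPs
--
--     # Set all fingers down by default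
--     for tip, pip in zip(finger_tips, finger_pips):
--         landmarks[tip][2] = 450  # tip below pip (finger down)
--         landmarks[pip][2] = 400
--
--     # Extend requested number of fingers
--     for i in range(min(num_fingers, 4)):
--         landmarks[finger_tips[i]][2] = 350  # tip above pip (finger up)
--
--     # Handle thumb separately (5th finger)
--     if num_fingers >= 5:
--         landmarks[4][1] = landmarks[3][1] - 30  # thumb extended
--     else:
--         landmarks[4][1] = landmarks[3][1] + 30  # thumb closed
--
--     return landmarks
-- ===== SOURCE B (Python) =====
-- def generate_synthetic_landmarks(num_fingers):
--     """Generate synthetic hand landmarks for testing (single-pass construction)."""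
--     tips = [8, 12, 16, 20]
--     extended = set(tips[:min(max(num_fingers, 0), 4)])
--     thumb_x = 330 if num_fingers >= 5 else 390
--     return [[i,
--              thumb_x if i == 4 else 300 + (i % 5) * 20,
--              350 if i in extended else (450 if i in tips else 400)]
--             for i in range(21)]
-- ===== Notes on version B (the rewrite author's own statement) =====
-- stated objective: simpler
-- what changed: B builds every landmark in one direct pass (y chosen by membership in the extended-tip prefix / tip set, thumb x chosen inline) instead of A's build-then-overwrite mutation loops and thumb post-edit.
import Mathlib
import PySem

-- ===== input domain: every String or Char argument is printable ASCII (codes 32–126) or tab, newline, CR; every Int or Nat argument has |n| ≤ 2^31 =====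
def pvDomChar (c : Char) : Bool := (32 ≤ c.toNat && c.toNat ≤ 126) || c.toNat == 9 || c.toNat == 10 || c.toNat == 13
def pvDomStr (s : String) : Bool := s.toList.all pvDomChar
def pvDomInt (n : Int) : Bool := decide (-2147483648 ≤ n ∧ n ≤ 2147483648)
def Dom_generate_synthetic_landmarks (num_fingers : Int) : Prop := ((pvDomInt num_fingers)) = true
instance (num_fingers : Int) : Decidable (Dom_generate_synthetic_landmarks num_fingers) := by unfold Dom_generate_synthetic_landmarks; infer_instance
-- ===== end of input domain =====

-- B replaces A's build-then-overwrite loops and thumb post-edit by one direct pass (simpler).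

-- ===== PORT A =====
-- landmarks[i][j] = v  (i, j literal non-negative indices in A, so List.set is exact)
def pvSet2 (lm : List (List Int)) (i j : Nat) (v : Int) : List (List Int) :=
  lm.set i ((lm.getD i []).set j v)

def generate_synthetic_landmarks (num_fingers : Int) : List (List Int) :=
  let landmarks := (PySem.List.pyRange 0 21 1).map
    (fun i => [i, 300 + (PySem.Int.mod i 5) * 20, 400])
  let finger_tips : List Int := [8, 12, 16, 20]
  let finger_pips : List Int := [6, 10, 14, 18]
  let landmarks := (finger_tips.zip finger_pips).foldl
    (fun lm tp => pvSet2 (pvSet2 lm tp.1.toNat 2 450) tp.2.toNat 2 400) landmarks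
  let landmarks := (PySem.List.pyRange 0 (min num_fingers 4) 1).foldl
    (fun lm i => pvSet2 lm (PySem.List.pyGetD finger_tips i 0).toNat 2 350) landmarks
  let landmarks :=
    if num_fingers ≥ 5 then
      pvSet2 landmarks 4 1 (PySem.List.pyGetD (landmarks.getD 3 []) 1 0 - 30)
    else
      pvSet2 landmarks 4 1 (PySem.List.pyGetD (landmarks.getD 3 []) 1 0 + 30)
  landmarks

-- ===== PORT B =====
def generate_synthetic_landmarks_alt (num_fingers : Int) : List (List Int) :=
  let tips : List Int := [8, 12, 16, 20]
  let extended := PySem.Set.ofList (PySem.List.slice tips none (some (min (max num_fingers 0) 4)))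
  let thumb_x : Int := if num_fingers ≥ 5 then 330 else 390
  (PySem.List.pyRange 0 21 1).map (fun i =>
    [i,
     if i == 4 then thumb_x else 300 + (PySem.Int.mod i 5) * 20,
     if PySem.Set.contains extended i then 350
     else if tips.contains i then 450 else 400])

-- ===== PRECONDITION & SPEC =====
def Spec_generate_synthetic_landmarks (num_fingers : Int) (out : List (List Int)) : Prop := out = generate_synthetic_landmarks_alt num_fingers
instance (num_fingers : Int) (out : List (List Int)) : Decidable (Spec_generate_synthetic_landmarks num_fingers out) := by unfold Spec_generate_synthetic_landmarks; infer_instance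

-- ===== CLAIM (what is proved, stated in full; the proofs are below) =====
def Claim_equal_generate_synthetic_landmarks : Prop := ∀ (num_fingers : Int), Dom_generate_synthetic_landmarks num_fingers → Spec_generate_synthetic_landmarks num_fingers (generate_synthetic_landmarks num_fingers)

-- ===== LEMMAS AND PROOFS =====

-- ===== VERDICT (by name: the statement is the Claim_ definition above) =====
theorem generate_synthetic_landmarks_spec : Claim_equal_generate_synthetic_landmarks := by
  intro n _
  unfold Spec_generate_synthetic_landmarks
  by_cases h : n ≤ 0
  · -- no extended fingers: the range loop is empty, the slice is empty
    unfold generate_synthetic_landmarks generate_synthetic_landmarks_alt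
    rw [PySem.List.pyRange_one_eq_nil (show min n 4 ≤ 0 by omega),
        show min (max n 0) 4 = 0 by omega]
    simp only [show ¬ n ≥ 5 by omega, if_neg, not_false_eq_true]
    decide
  · by_cases h2 : n < 5
    · interval_cases n <;> decide
    · unfold generate_synthetic_landmarks generate_synthetic_landmarks_alt
      rw [show min n 4 = 4 by omega, show min (max n 0) 4 = 4 by omega]
      simp only [show n ≥ 5 by omega, if_pos]
      decide
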